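-- pv_equiv track=rewrite | github.com/juanvallaure1/TFGJuan | algoritmos_geneticos_para_la_composicion_musical.py | es_acorde_mayor
-- ===== SOURCE A (Python) =====
-- def es_acorde_mayor(acorde):
--
--     if len(acorde) == 3:    #NO CONSIDERAMOS OTROS CASOS POR EL MOMENTO
--     #REORDENAMOS PRIMERO EL ACORDE
--         acorde_reordenado =sorted([i%12 for i in acorde])
--     #REORDENÁNDOLO DE ESTA FORMA EL ACORDE PUEDE APARECER TAMBIÉN EN PRIMERA O SEGUNDA INVERSIÓN
--         dist1 = acorde_reordenado[1] - acorde_reordenado[0]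
--         dist2 = acorde_reordenado[2] - acorde_reordenado[1]
--
--         if (dist1 == 4 and dist2 == 3) or (dist1 == 3 and dist2 == 5) or (dist1 == 5 and dist2 == 4):
--             return True
--         else:
--             return False
-- ===== SOURCE B (Python) =====
-- def es_acorde_mayor(acorde):
--     # Membership test over candidate roots on the pitch-class set,
--     # instead of sorting and comparing adjacent interval gaps.
--     if len(acorde) == 3:
--         pcs = {i % 12 for i in acorde}
--         return any((r + 4) % 12 in pcs and (r + 7) % 12 in pcs for r in pcs)
-- ===== Notes on version B (the rewrite author's own statement) =====
-- stated objective: idiomatic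
-- what changed: Replaces sort-then-adjacent-gap comparison (with three inversion gap patterns) by a pitch-class set and a membership search for a root r with (r+4)%12 and (r+7)%12 present.
import Mathlib
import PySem

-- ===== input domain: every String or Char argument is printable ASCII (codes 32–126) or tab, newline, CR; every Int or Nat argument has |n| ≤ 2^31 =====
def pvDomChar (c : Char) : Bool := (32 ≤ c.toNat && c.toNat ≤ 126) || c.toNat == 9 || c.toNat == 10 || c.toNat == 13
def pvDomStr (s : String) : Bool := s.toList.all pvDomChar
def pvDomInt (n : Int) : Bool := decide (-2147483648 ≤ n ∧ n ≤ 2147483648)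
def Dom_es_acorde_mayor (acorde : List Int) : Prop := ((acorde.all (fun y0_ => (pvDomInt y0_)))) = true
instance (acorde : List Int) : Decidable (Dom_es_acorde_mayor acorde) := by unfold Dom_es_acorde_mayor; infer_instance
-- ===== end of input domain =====

-- B replaces A's sort-then-adjacent-gap test by a pitch-class set with a membership
-- search for a root; same cost, more idiomatic.


-- ===== PORT A =====
def es_acorde_mayor (acorde : List Int) : Option Bool :=
  if acorde.length == 3 then
    let acorde_reordenado := PySem.List.sorted (acorde.map (fun i => PySem.Int.mod i 12)) (fun x => x) false
    -- sorted preserves length, so the list has exactly 3 elements; the fallback is unreachable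
    match acorde_reordenado with
    | [a, b, c] =>
      let dist1 := b - a
      let dist2 := c - b
      if (dist1 == 4 && dist2 == 3) || (dist1 == 3 && dist2 == 5) || (dist1 == 5 && dist2 == 4) then
        some true
      else
        some false
    | _ => none
  else none

-- ===== PORT B =====
def es_acorde_mayor_alt (acorde : List Int) : Option Bool :=
  if acorde.length == 3 then
    let pcs : PySem.Set Int := PySem.Set.ofList (acorde.map (fun i => PySem.Int.mod i 12))
    some (pcs.any (fun r =>
      PySem.Set.contains pcs (PySem.Int.mod (r + 4) 12) &&
      PySem.Set.contains pcs (PySem.Int.mod (r + 7) 12)))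
  else none

-- ===== PRECONDITION & SPEC =====
def Spec_es_acorde_mayor (acorde : List Int) (out : Option Bool) : Prop := out = es_acorde_mayor_alt acorde
instance (acorde : List Int) (out : Option Bool) : Decidable (Spec_es_acorde_mayor acorde out) := by unfold Spec_es_acorde_mayor; infer_instance

-- ===== CLAIM (what is proved, stated in full; the proofs are below) =====
def Claim_equal_es_acorde_mayor : Prop := ∀ (acorde : List Int), Dom_es_acorde_mayor acorde → Spec_es_acorde_mayor acorde (es_acorde_mayor acorde)

-- ===== LEMMAS AND PROOFS =====

theorem pv_mod_fin (i : Int) : ∃ a : Fin 12, PySem.Int.mod i 12 = (a.val : Int) := by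
  have h0 := PySem.Int.mod_nonneg i (b := 12) (by norm_num)
  have h1 := PySem.Int.mod_lt i (b := 12) (by norm_num)
  exact ⟨⟨(PySem.Int.mod i 12).toNat, by omega⟩, by simp; omega⟩

theorem pv_key : ∀ a b c : Fin 12,
    es_acorde_mayor [(a.val : Int), (b.val : Int), (c.val : Int)] =
    es_acorde_mayor_alt [(a.val : Int), (b.val : Int), (c.val : Int)] := by decide

theorem pv_A_mod (x y z : Int) :
    es_acorde_mayor [x, y, z] =
    es_acorde_mayor [PySem.Int.mod x 12, PySem.Int.mod y 12, PySem.Int.mod z 12] := by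
  simp [es_acorde_mayor]

theorem pv_B_mod (x y z : Int) :
    es_acorde_mayor_alt [x, y, z] =
    es_acorde_mayor_alt [PySem.Int.mod x 12, PySem.Int.mod y 12, PySem.Int.mod z 12] := by
  simp [es_acorde_mayor_alt]

-- ===== VERDICT (by name: the statement is the Claim_ definition above) =====
theorem es_acorde_mayor_spec : Claim_equal_es_acorde_mayor := by
  intro acorde _
  unfold Spec_es_acorde_mayor
  match acorde with
  | [] => rfl
  | [_] => rfl
  | [_, _] => rfl
  | [x, y, z] =>
    obtain ⟨a, ha⟩ := pv_mod_fin x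
    obtain ⟨b, hb⟩ := pv_mod_fin y
    obtain ⟨c, hc⟩ := pv_mod_fin z
    rw [pv_A_mod, pv_B_mod, ha, hb, hc]
    exact pv_key a b c
  | _ :: _ :: _ :: _ :: rest =>
    simp [es_acorde_mayor, es_acorde_mayor_alt]
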